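-- pv_equiv track=rewrite | github.com/modin-project/modin | modin/core/storage_formats/pandas/utils.py | get_length_list
-- ===== SOURCE A (Python) =====
-- def compute_chunksize(axis_len: int, num_splits: int, min_block_size: int) -> int:
--     """
--     Compute the number of elements (rows/columns) to include in each partition.
--
--     Chunksize is defined the same for both axes.
--
--     Parameters
--     ----------
--     axis_len : int
--         Element count in an axis.
--     num_splits : int
--         The number of splits.
--     min_block_size : int
--         Minimum number of rows/columns in a single split.
--
--     Returns
--     -------
--     int
--         Integer number of rows/columns to split the DataFrame will be returned.
--     """
--     if not isinstance(min_block_size, int) or min_block_size <= 0: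
--         raise ValueError(
--             f"'min_block_size' should be int > 0, passed: {min_block_size=}"
--         )
--
--     chunksize = axis_len // num_splits
--     if axis_len % num_splits:
--         chunksize += 1
--     # chunksize shouldn't be less than `min_block_size` to avoid a
--     # large amount of small partitions.
--     return max(chunksize, min_block_size)
--
-- def get_length_list(axis_len: int, num_splits: int, min_block_size: int) -> list:
--     """
--     Compute partitions lengths along the axis with the specified number of splits.
--
--     Parameters
--     ----------
--     axis_len : int
--         Element count in an axis.
--     num_splits : int
--         Number of splits along the axis.
--     min_block_size : int
--         Minimum number of rows/columns in a single split.
--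
--     Returns
--     -------
--     list of ints
--         List of integer lengths of partitions.
--     """
--     chunksize = compute_chunksize(axis_len, num_splits, min_block_size)
--     return [
--         (
--             chunksize
--             if (i + 1) * chunksize <= axis_len
--             else max(0, axis_len - i * chunksize)
--         )
--         for i in range(num_splits)
--     ]
-- ===== SOURCE B (Python) =====
-- def compute_chunksize(axis_len: int, num_splits: int, min_block_size: int) -> int:
--     if not isinstance(min_block_size, int) or min_block_size <= 0:
--         raise ValueError(
--             f"'min_block_size' should be int > 0, passed: {min_block_size=}"
--         )
--     chunksize = axis_len // num_splits
--     if axis_len % num_splits: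
--         chunksize += 1
--     return max(chunksize, min_block_size)
--
--
-- def get_length_list(axis_len: int, num_splits: int, min_block_size: int) -> list:
--     # Segment assembly: a run of full chunks, one partial chunk, then zeros.
--     chunksize = compute_chunksize(axis_len, num_splits, min_block_size)
--     if num_splits <= 0:
--         return []
--     full = min(num_splits, max(0, axis_len // chunksize))
--     lengths = [chunksize] * full
--     if full < num_splits:
--         lengths.append(max(0, axis_len - full * chunksize))
--         lengths.extend([0] * (num_splits - full - 1))
--     return lengths
-- ===== Notes on version B (the rewrite author's own statement) =====
-- stated objective: faster
-- what changed: Instead of A's per-index comprehension testing (i+1)*chunksize <= axis_len for every i, B computes once how many full chunks fit (full = min(num_splits, max(0, axis_len // chunksize))) and assembles the result by segments via list replication: [chunksize]*full, one partial entry, then zeros — replacing per-element Python arithmetic with bulk list operations.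
-- outside the precondition, e.g. on get_length_list(10, 0, 2): A raises ZeroDivisionError, B raises ZeroDivisionError; on get_length_list(10, 3, 0): A raises ValueError, B raises ValueError
import Mathlib
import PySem

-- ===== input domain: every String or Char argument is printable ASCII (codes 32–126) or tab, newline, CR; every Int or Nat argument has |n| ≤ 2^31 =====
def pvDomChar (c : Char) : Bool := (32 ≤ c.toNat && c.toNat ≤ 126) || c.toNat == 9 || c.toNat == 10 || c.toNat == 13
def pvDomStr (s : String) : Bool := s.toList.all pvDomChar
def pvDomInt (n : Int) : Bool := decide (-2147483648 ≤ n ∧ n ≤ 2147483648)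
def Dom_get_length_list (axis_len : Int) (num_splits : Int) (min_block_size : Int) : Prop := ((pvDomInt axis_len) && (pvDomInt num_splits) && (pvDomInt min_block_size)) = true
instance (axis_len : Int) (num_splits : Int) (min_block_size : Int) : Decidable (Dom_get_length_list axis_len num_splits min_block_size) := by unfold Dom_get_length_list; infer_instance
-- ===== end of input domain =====

-- B assembles the length list by segments (full chunks, one partial, zeros) instead of A's
-- per-index comprehension with bulk list replication; same asymptotic cost. Return-value equivalence.

-- ===== PORT A =====
-- shared helper: compute_chunksize appears verbatim in both Source A and Source B
def pyComputeChunksize (axis_len : Int) (num_splits : Int) (min_block_size : Int) : Int :=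
  let chunksize := PySem.Int.floordiv axis_len num_splits
  let chunksize := if PySem.Int.mod axis_len num_splits ≠ 0 then chunksize + 1 else chunksize
  max chunksize min_block_size

def get_length_list (axis_len : Int) (num_splits : Int) (min_block_size : Int) : List Int :=
  let chunksize := pyComputeChunksize axis_len num_splits min_block_size
  (PySem.List.pyRange 0 num_splits 1).map (fun i =>
    if (i + 1) * chunksize ≤ axis_len then chunksize
    else max 0 (axis_len - i * chunksize))

-- ===== PORT B =====
def get_length_list_alt (axis_len : Int) (num_splits : Int) (min_block_size : Int) : List Int :=
  let chunksize := pyComputeChunksize axis_len num_splits min_block_size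
  if num_splits ≤ 0 then []
  else
    let full := min num_splits (max 0 (PySem.Int.floordiv axis_len chunksize))
    let lengths := List.replicate full.toNat chunksize
    if full < num_splits then
      lengths ++ (max 0 (axis_len - full * chunksize) :: List.replicate (num_splits - full - 1).toNat 0)
    else
      lengths

-- ===== PRECONDITION & SPEC =====
-- Pre_ excludes exactly the inputs where the Python raises: num_splits = 0 (ZeroDivisionError
-- in compute_chunksize) and min_block_size ≤ 0 (explicit ValueError).
def Pre_get_length_list (axis_len : Int) (num_splits : Int) (min_block_size : Int) : Prop :=
  num_splits ≠ 0 ∧ 0 < min_block_size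
instance (axis_len : Int) (num_splits : Int) (min_block_size : Int) : Decidable (Pre_get_length_list axis_len num_splits min_block_size) := by unfold Pre_get_length_list; infer_instance

def pvWitness_get_length_list : Int × Int × Int := (10, 3, 2)

def Spec_get_length_list (axis_len : Int) (num_splits : Int) (min_block_size : Int) (out : List Int) : Prop := out = get_length_list_alt axis_len num_splits min_block_size
instance (axis_len : Int) (num_splits : Int) (min_block_size : Int) (out : List Int) : Decidable (Spec_get_length_list axis_len num_splits min_block_size out) := by unfold Spec_get_length_list; infer_instance

-- ===== CLAIM (what is proved, stated in full; the proofs are below) =====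
def Claim_equal_get_length_list : Prop := ∀ (axis_len : Int) (num_splits : Int) (min_block_size : Int), Dom_get_length_list axis_len num_splits min_block_size → Pre_get_length_list axis_len num_splits min_block_size → Spec_get_length_list axis_len num_splits min_block_size (get_length_list axis_len num_splits min_block_size)

-- ===== LEMMAS AND PROOFS =====

theorem get_length_list_eq (L n m : Int) (hn : n ≠ 0) (hm : 0 < m) :
    get_length_list L n m = get_length_list_alt L n m := by
  unfold get_length_list get_length_list_alt
  set c := pyComputeChunksize L n m with hcdef
  have hc : 0 < c := lt_of_lt_of_le hm (le_max_right _ _)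
  by_cases hnpos : n ≤ 0
  · have : n < 0 := lt_of_le_of_ne hnpos hn
    simp [PySem.List.pyRange_one_eq_nil (by omega : n ≤ 0), hnpos]
  · rw [if_neg hnpos]
    push_neg at hnpos
    set q := PySem.Int.floordiv L c with hqdef
    have hq : q * c ≤ L ∧ L < (q + 1) * c :=
      (PySem.Int.floordiv_eq_iff_of_pos hc).mp hqdef.symm
    set full := min n (max 0 q) with hfdef
    have hf0 : 0 ≤ full := by omega
    have hfn : full ≤ n := by omega
    have hcond : ∀ k : Nat, ((0 : Int) + (k : Int) + 1) * c ≤ L ↔ (k : Int) + 1 ≤ q := by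
      intro k
      rw [zero_add]
      constructor
      · intro h
        by_contra hlt
        push_neg at hlt
        have h1 : q + 1 ≤ (k : Int) + 1 := by omega
        have := mul_le_mul_of_nonneg_right h1 (le_of_lt hc)
        omega
      · intro h
        have := mul_le_mul_of_nonneg_right h (le_of_lt hc)
        omega
    by_cases hfln : full < n
    · rw [if_pos hfln]
      apply List.ext_getElem
      · simp only [List.length_map, PySem.List.length_pyRange_one, List.length_append,
          List.length_replicate, List.length_cons]
        omega
      · intro k hk1 hk2
        have hkn : (k : Int) < n := by
          have : k < (n - 0).toNat := by
            simpa [PySem.List.length_pyRange_one] using hk1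
          omega
        rw [List.getElem_map, PySem.List.getElem_pyRange_one]
        by_cases hkfull : (k : Int) < full
        · -- full-chunk region: both sides yield c
          have hkq : (k : Int) + 1 ≤ q := by omega
          rw [if_pos ((hcond k).mpr hkq)]
          rw [List.getElem_append_left (by simp only [List.length_replicate]; omega)]
          simp [List.getElem_replicate]
        · push_neg at hkfull
          have hfq : q ≤ full := by omega
          rw [if_neg (fun h => by have := (hcond k).mp h; omega)]
          rw [List.getElem_append_right (by simp only [List.length_replicate]; omega)]
          simp only [List.length_replicate]
          by_cases hkeq : k = full.toNat
          · simp only [show k - full.toNat = 0 from by omega, List.getElem_cons_zero]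
            have : (0 : Int) + (k : Int) = full := by omega
            rw [this]
          · have hgt : full + 1 ≤ (k : Int) := by omega
            have hLk : L ≤ (k : Int) * c := by
              have h1 : q + 1 ≤ (k : Int) := by omega
              have := mul_le_mul_of_nonneg_right h1 (le_of_lt hc)
              omega
            rw [List.getElem_cons]
            rw [dif_neg (by omega)]
            simp only [List.getElem_replicate, zero_add]
            omega
    · rw [if_neg hfln]
      have hfeq : full = n := by omega
      apply List.ext_getElem
      · simp only [List.length_map, PySem.List.length_pyRange_one, List.length_replicate]
        omega
      · intro k hk1 hk2
        have hkn : (k : Int) < n := by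
          have : k < (n - 0).toNat := by
            simpa [PySem.List.length_pyRange_one] using hk1
          omega
        rw [List.getElem_map, PySem.List.getElem_pyRange_one]
        have hkq : (k : Int) + 1 ≤ q := by omega
        rw [if_pos ((hcond k).mpr hkq)]
        simp [List.getElem_replicate]

-- ===== VERDICT (by name: the statement is the Claim_ definition above) =====
theorem get_length_list_spec : Claim_equal_get_length_list := by
  intro L n m _ hpre
  unfold Spec_get_length_list
  exact get_length_list_eq L n m hpre.1 hpre.2
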